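-- pv_equiv track=rewrite | github.com/Kannav02/data-struct-python | hashmap_and_arrays/bad_pairs.py | bad_pairs
-- ===== SOURCE A (Python) =====
-- from typing import List
--
-- def bad_pairs(array:List[int])->int:
--     # normal solution is finding all the bad pairs naively, which is o(n^2)
--     # condition for bad pair is nums[j] - nums[i] != j-i i<j
--     # we change the condition a bit nums[i] - i != nums[j] - j , which means if key[i] = nums[i] -1 , key[i] != key[j] should be the case
--     # total pairs = n(n-1)/2
--
--     n = len(array)
--     total_pairs = n*(n-1)//2
--     count_map = {}
--     good_pairs = 0
--
--     for i, num in enumerate(array):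
--         key = num-i
--         if key in count_map:
--             good_pairs+= count_map[key]
--             count_map[key]+=1
--         else:
--             count_map[key]=1
--
--     return total_pairs - good_pairs
-- ===== SOURCE B (Python) =====
-- from typing import List
--
-- def bad_pairs(array: List[int]) -> int:
--     # build a frequency table of key = array[i] - i, then count good pairs per group
--     n = len(array)
--     counts = {}
--     for i, x in enumerate(array):
--         k = x - i
--         counts[k] = counts.get(k, 0) + 1
--     good_pairs = sum(c * (c - 1) // 2 for c in counts.values())
--     return n * (n - 1) // 2 - good_pairs
-- ===== Notes on version B (the rewrite author's own statement) =====
-- stated objective: alternative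
-- what changed: A counts good pairs incrementally inside the single dict-building pass (adding the current count at each element); B first builds the full frequency table of key = array[i]-i and then sums c*(c-1)//2 over the group sizes in a second pass.
import Mathlib
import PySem

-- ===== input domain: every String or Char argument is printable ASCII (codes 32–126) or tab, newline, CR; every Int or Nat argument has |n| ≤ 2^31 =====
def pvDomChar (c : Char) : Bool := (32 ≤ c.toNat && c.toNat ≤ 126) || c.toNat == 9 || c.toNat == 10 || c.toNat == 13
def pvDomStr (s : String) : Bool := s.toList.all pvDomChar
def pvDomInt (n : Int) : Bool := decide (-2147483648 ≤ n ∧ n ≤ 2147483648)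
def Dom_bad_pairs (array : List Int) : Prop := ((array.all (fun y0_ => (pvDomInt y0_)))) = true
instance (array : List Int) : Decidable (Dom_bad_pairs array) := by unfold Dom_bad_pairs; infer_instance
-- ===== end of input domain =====

-- B replaces A's incremental good-pair accumulation inside the dict-building pass
-- by building the full frequency table first and then summing c*(c-1)//2 over group sizes (alternative decomposition).


-- ===== PORT A =====
def bad_pairs (array : List Int) : Int :=
  let n : Int := array.length
  let total_pairs := PySem.Int.floordiv (n * (n - 1)) 2
  let st := (PySem.List.enumerate array 0).foldl
    (fun (st : PySem.Dict Int Int × Int) p =>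
      let key := p.2 - p.1
      if st.1.contains key then
        (st.1.modify key 0 (· + 1), st.2 + st.1.getD key 0)
      else
        (st.1.insert key 1, st.2))
    (PySem.Dict.empty, 0)
  total_pairs - st.2

-- ===== PORT B =====
def bad_pairs_alt (array : List Int) : Int :=
  let n : Int := array.length
  let counts := (PySem.List.enumerate array 0).foldl
    (fun (d : PySem.Dict Int Int) p =>
      let k := p.2 - p.1
      d.insert k (d.getD k 0 + 1))
    PySem.Dict.empty
  let good_pairs := (counts.values.map (fun c => PySem.Int.floordiv (c * (c - 1)) 2)).sum
  PySem.Int.floordiv (n * (n - 1)) 2 - good_pairs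

-- ===== PRECONDITION & SPEC =====
def Spec_bad_pairs (array : List Int) (out : Int) : Prop := out = bad_pairs_alt array
instance (array : List Int) (out : Int) : Decidable (Spec_bad_pairs array out) := by unfold Spec_bad_pairs; infer_instance

-- ===== CLAIM (what is proved, stated in full; the proofs are below) =====
def Claim_equal_bad_pairs : Prop := ∀ (array : List Int), Dom_bad_pairs array → Spec_bad_pairs array (bad_pairs array)

-- ===== LEMMAS AND PROOFS =====

-- "choose 2" summed over the values of a dict
def pvT (d : PySem.Dict Int Int) : Int :=
  (d.values.map (fun c => PySem.Int.floordiv (c * (c - 1)) 2)).sum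

-- floordiv (c*(c-1)) 2 is exact division (the product is even)
lemma pv_fd2 (c : Int) : PySem.Int.floordiv (c * (c - 1)) 2 * 2 = c * (c - 1) := by
  have he : (2 : Int) ∣ c * (c - 1) := by
    rcases Int.even_or_odd c with h | h
    · exact Dvd.dvd.mul_right h.two_dvd _
    · obtain ⟨k, hk⟩ := h
      exact Dvd.dvd.mul_left ⟨k, by omega⟩ _
  have hm : PySem.Int.mod (c * (c - 1)) 2 = 0 :=
    (PySem.Int.mod_eq_zero_iff_dvd _ _).mpr he
  have := PySem.Int.floordiv_mul_add_mod (c * (c - 1)) 2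
  linarith

lemma pv_fd2_step (c : Int) :
    PySem.Int.floordiv ((c + 1) * (c + 1 - 1)) 2
      = PySem.Int.floordiv (c * (c - 1)) 2 + c := by
  have h1 := pv_fd2 (c + 1)
  have h2 := pv_fd2 c
  nlinarith [h1, h2]

-- sum over a nodup list of a function that changed at exactly one member
lemma pv_sum_map_update (ks : List Int) (k : Int) (f g : Int → Int)
    (hnd : ks.Nodup) (hk : k ∈ ks) (h : ∀ j ∈ ks, j ≠ k → g j = f j) :
    (ks.map g).sum = (ks.map f).sum + (g k - f k) := by
  induction ks with
  | nil => cases hk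
  | cons a t ih =>
    rcases List.mem_cons.mp hk with rfl | hkt
    · have : ∀ j ∈ t, g j = f j := fun j hj =>
        h j (List.mem_cons_of_mem _ hj) (fun he => ((List.nodup_cons.mp hnd).1 (he ▸ hj)))
      simp [List.map_congr_left this]
      ring
    · have ha : g a = f a := h a (List.mem_cons_self) (fun he => (List.nodup_cons.mp hnd).1 (he ▸ hkt))
      have := ih (List.nodup_cons.mp hnd).2 hkt (fun j hj => h j (List.mem_cons_of_mem _ hj))
      simp [ha, this]
      ring

-- A's accumulator always equals pvT of its dict, and its dict is the modify-fold
lemma pv_inv (l : List Int) (d : PySem.Dict Int Int) (g : Int)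
    (hnd : d.keys.Nodup) (hg : g = pvT d) :
    l.foldl
      (fun (st : PySem.Dict Int Int × Int) key =>
        if st.1.contains key then
          (st.1.modify key 0 (· + 1), st.2 + st.1.getD key 0)
        else
          (st.1.insert key 1, st.2))
      (d, g)
    = (l.foldl (fun d x => d.modify x 0 (· + 1)) d,
       pvT (l.foldl (fun d x => d.modify x 0 (· + 1)) d)) := by
  induction l generalizing d g with
  | nil => simp [hg]
  | cons x t ih =>
    by_cases hc : d.contains x = true
    · have hxk : x ∈ d.keys := (PySem.Dict.contains_iff_mem_keys _ _).mp hc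
      have hkeys : (d.modify x 0 (· + 1)).keys = d.keys := by
        rw [PySem.Dict.keys_modify, PySem.Dict.keys_insert_of_contains (h := hc)]
      have hnd' : (d.modify x 0 (· + 1)).keys.Nodup := hkeys ▸ hnd
      have hT : g + d.getD x 0 = pvT (d.modify x 0 (· + 1)) := by
        have hv : (d.modify x 0 (· + 1)).values
            = (d.modify x 0 (· + 1)).keys.map (fun k => (d.modify x 0 (· + 1)).getD k 0) :=
          PySem.Dict.values_eq_map_keys _ hnd' 0
        have hv0 : d.values = d.keys.map (fun k => d.getD k 0) :=
          PySem.Dict.values_eq_map_keys _ hnd 0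
        have hsum := pv_sum_map_update d.keys x
          (fun j => PySem.Int.floordiv (d.getD j 0 * (d.getD j 0 - 1)) 2)
          (fun j => PySem.Int.floordiv ((d.modify x 0 (· + 1)).getD j 0 *
              ((d.modify x 0 (· + 1)).getD j 0 - 1)) 2)
          hnd hxk
          (by intro j hj hne
              simp only [PySem.Dict.getD_modify_of_ne (hne := hne)])
        simp only [pvT, hv, hkeys, hv0, List.map_map, Function.comp_def] at *
        rw [hsum, PySem.Dict.getD_modify_self]
        have := pv_fd2_step (d.getD x 0)
        omega
      simp only [List.foldl_cons, hc, if_true]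
      exact ih _ _ hnd' hT
    · have hc' : d.contains x = false := by simpa using hc
      have hins : d.insert x 1 = d.modify x 0 (· + 1) := by
        simp [PySem.Dict.modify, PySem.Dict.getD_of_not_contains (h := hc')]
      have hnd' : (d.insert x 1).keys.Nodup := PySem.Dict.nodup_keys_insert _ _ _ hnd
      have hT : g = pvT (d.insert x 1) := by
        have hi : (d.insert x 1).items = d.items ++ [(x, 1)] :=
          PySem.Dict.items_insert_of_not_contains d 1 hc'
        simp only [pvT, PySem.Dict.values, hi, List.map_append, List.sum_append] at *
        simpa using hg
      simp only [List.foldl_cons, hc', if_false, Bool.false_eq_true]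
      rw [hins] at hnd' hT ⊢
      exact ih _ _ hnd' hT

-- ===== VERDICT (by name: the statement is the Claim_ definition above) =====
theorem bad_pairs_spec : Claim_equal_bad_pairs := by
  intro array _
  show bad_pairs array = bad_pairs_alt array
  unfold bad_pairs bad_pairs_alt
  have hA := pv_inv ((PySem.List.enumerate array 0).map (fun p => p.2 - p.1))
      PySem.Dict.empty 0 (by simp) (by simp [pvT, PySem.Dict.values, PySem.Dict.empty])
  simp only [List.foldl_map] at hA
  have hB : (fun (d : PySem.Dict Int Int) (p : Int × Int) =>
        d.insert (p.2 - p.1) (d.getD (p.2 - p.1) 0 + 1))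
      = (fun (d : PySem.Dict Int Int) (p : Int × Int) => d.modify (p.2 - p.1) 0 (· + 1)) :=
    funext fun d => funext fun p => by simp [PySem.Dict.modify]
  simp only [pvT] at hA
  rw [hA, hB]
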